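-- pv_equiv track=rewrite | github.com/lbvx/CP-Problems | codeforces/849/B.py | check
-- ===== SOURCE A (Python) =====
-- def check(moves:str):
--     pos = [0, 0]
--     for m in moves:
--         if m == 'U':
--             pos[1] += 1
--         elif m == 'D':
--             pos[1] -= 1
--         elif m == 'R':
--             pos[0] += 1
--         elif m == 'L':
--             pos[0] -= 1
--
--         if pos == [1, 1]:
--             return True
--     return False
-- ===== SOURCE B (Python) =====
-- def check(moves: str):
--     # Pass 1: total displacement of the whole walk.
--     tx = sum(1 if m == 'R' else -1 if m == 'L' else 0 for m in moves) - 1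
--     ty = sum(1 if m == 'U' else -1 if m == 'D' else 0 for m in moves) - 1
--     # Pass 2: scan BACKWARDS accumulating suffix displacements; the position after
--     # prefix i equals total minus the suffix displacement, so the walk visits (1,1)
--     # iff some proper suffix sum equals total-(1,1) = (tx, ty).
--     sx = sy = 0
--     for m in reversed(moves):
--         if sx == tx and sy == ty:
--             return True
--         sx += 1 if m == 'R' else -1 if m == 'L' else 0
--         sy += 1 if m == 'U' else -1 if m == 'D' else 0
--     return False
-- ===== Notes on version B (the rewrite author's own statement) =====
-- stated objective: alternative
-- what changed: Instead of stepping forward and comparing each prefix position with (1,1), B computes the total displacement first and then scans the string BACKWARDS accumulating suffix displacements, returning whether some proper suffix sum equals total-(1,1); correct because position after prefix i = total - suffix sum from i.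
import Mathlib
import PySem

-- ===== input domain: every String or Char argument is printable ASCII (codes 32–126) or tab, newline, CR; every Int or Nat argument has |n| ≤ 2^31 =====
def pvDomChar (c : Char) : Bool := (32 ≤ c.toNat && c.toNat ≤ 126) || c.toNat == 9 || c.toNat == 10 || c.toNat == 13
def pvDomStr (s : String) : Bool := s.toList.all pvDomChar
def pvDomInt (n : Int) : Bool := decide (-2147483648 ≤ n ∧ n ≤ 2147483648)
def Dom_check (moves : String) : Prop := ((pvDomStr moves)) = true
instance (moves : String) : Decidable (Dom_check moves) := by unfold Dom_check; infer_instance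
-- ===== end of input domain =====

-- B replaces A's forward stepping loop by: compute the total displacement first, then
-- scan the string backwards accumulating suffix displacements and compare them with
-- total-(1,1) (position after prefix i = total - suffix sum from i). Same cost, different traversal.

-- ===== PORT A =====
-- the if/elif branch block of A's loop body
def checkStep (m : Char) (pos : Int × Int) : Int × Int :=
  if m = 'U' then (pos.1, pos.2 + 1)
  else if m = 'D' then (pos.1, pos.2 - 1)
  else if m = 'R' then (pos.1 + 1, pos.2)
  else if m = 'L' then (pos.1 - 1, pos.2)
  else pos

-- A's for-loop: state is the current position; early return True when pos == [1, 1]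
def checkGo : List Char → Int × Int → Bool
  | [], _ => false
  | m :: rest, pos =>
    let pos := checkStep m pos
    if pos = (1, 1) then true else checkGo rest pos

def check (moves : String) : Bool := checkGo moves.toList (0, 0)

-- ===== PORT B =====
-- 1 if m == 'R' else -1 if m == 'L' else 0
def deltaX (m : Char) : Int := if m = 'R' then 1 else if m = 'L' then -1 else 0
-- 1 if m == 'U' else -1 if m == 'D' else 0
def deltaY (m : Char) : Int := if m = 'U' then 1 else if m = 'D' then -1 else 0

-- the reversed(moves) loop: accumulate the suffix displacement, compare with (tx, ty)
def revGo (tx ty : Int) : List Char → Int → Int → Bool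
  | [], _, _ => false
  | m :: rest, sx, sy =>
    if sx = tx ∧ sy = ty then true
    else revGo tx ty rest (sx + deltaX m) (sy + deltaY m)

def check_alt (moves : String) : Bool :=
  let cs := moves.toList
  let tx := (cs.map deltaX).sum - 1
  let ty := (cs.map deltaY).sum - 1
  revGo tx ty cs.reverse 0 0

-- ===== PRECONDITION & SPEC =====
def Spec_check (moves : String) (out : Bool) : Prop := out = check_alt moves
instance (moves : String) (out : Bool) : Decidable (Spec_check moves out) := by unfold Spec_check; infer_instance

-- ===== CLAIM (what is proved, stated in full; the proofs are below) =====
def Claim_equal_check : Prop := ∀ (moves : String), Dom_check moves → Spec_check moves (check moves)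

-- ===== LEMMAS AND PROOFS =====

-- per-move displacement as a pair
def delta (m : Char) : Int × Int := (deltaX m, deltaY m)

-- positions after each nonempty prefix, starting from p (what A's loop compares with (1,1))
def positionsFrom : List Char → Int × Int → List (Int × Int)
  | [], _ => []
  | m :: rest, p =>
    let q := p + delta m
    q :: positionsFrom rest q

-- position before each step, starting from s (what B's backward loop compares with (tx,ty))
def partials : List Char → Int × Int → List (Int × Int)
  | [], _ => []
  | m :: rest, s => s :: partials rest (s + delta m)

def sumD (l : List Char) : Int × Int := (l.map delta).sum

theorem checkStep_eq (m : Char) (p : Int × Int) : checkStep m p = p + delta m := by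
  simp only [checkStep, delta, deltaX, deltaY]
  split_ifs with h1 h2 h3 h4 <;> simp_all [Prod.ext_iff] <;> ring

theorem checkGo_eq_mem (l : List Char) (p : Int × Int) :
    checkGo l p = decide ((1, 1) ∈ positionsFrom l p) := by
  induction l generalizing p with
  | nil => simp [checkGo, positionsFrom]
  | cons m rest ih =>
    simp only [checkGo, positionsFrom, checkStep_eq, ih]
    by_cases h : p + delta m = (1, 1) <;> simp [h, eq_comm]

theorem revGo_eq_mem (tx ty : Int) (l : List Char) (sx sy : Int) :
    revGo tx ty l sx sy = decide ((tx, ty) ∈ partials l (sx, sy)) := by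
  induction l generalizing sx sy with
  | nil => simp [revGo, partials]
  | cons m rest ih =>
    simp only [revGo, partials, ih, delta, Prod.mk_add_mk]
    by_cases h : sx = tx ∧ sy = ty
    · simp [h.1, h.2]
    · have : ¬ ((tx, ty) = ((sx : Int), (sy : Int))) := by
        simp; intro h1 h2; exact h ⟨h1.symm, h2.symm⟩
      simp [h, this]

theorem sumD_cons (m : Char) (l : List Char) : sumD (m :: l) = delta m + sumD l := by
  simp [sumD]

theorem sumD_reverse (l : List Char) : sumD l.reverse = sumD l := by
  simp [sumD, List.map_reverse, List.sum_reverse]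

theorem partials_append (l : List Char) (m : Char) (s : Int × Int) :
    partials (l ++ [m]) s = partials l s ++ [s + sumD l] := by
  induction l generalizing s with
  | nil => simp [partials, sumD]
  | cons m' rest ih =>
    simp only [List.cons_append, partials, ih, sumD_cons]
    rw [add_assoc]

theorem mem_positions_iff (l : List Char) (p q : Int × Int) :
    (q ∈ positionsFrom l p) ↔ ((sumD l + p - q) ∈ partials l.reverse (0, 0)) := by
  induction l generalizing p with
  | nil => simp [positionsFrom, partials]
  | cons m rest ih =>
    rw [List.reverse_cons, partials_append, sumD_reverse]
    simp only [positionsFrom, List.mem_cons, List.mem_append,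
      List.not_mem_nil, or_false, sumD_cons, ih]
    have hiff : (q = p + delta m) ↔ (delta m + sumD rest + p - q = (0, 0) + sumD rest) := by
      have hz : ((0, 0) : Int × Int) = 0 := rfl
      rw [hz]
      constructor
      · intro h; rw [h]; abel
      · intro h
        have h2 : q - (p + delta m) = 0 := by
          calc q - (p + delta m)
              = 0 + sumD rest - (delta m + sumD rest + p - q) - (delta m + sumD rest + p - q)
                + (delta m + sumD rest + p - q) + (q - (p + delta m)) - (q - (p + delta m)) := by abel
            _ = 0 := by rw [h]; abel
        exact (sub_eq_zero.mp h2)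
    have harith : delta m + sumD rest + p - q = sumD rest + (p + delta m) - q := by abel
    rw [harith] at hiff ⊢
    constructor
    · rintro (h | h)
      · exact Or.inr (hiff.mp h)
      · exact Or.inl h
    · rintro (h | h)
      · exact Or.inr h
      · exact Or.inl (hiff.mpr h)

-- ===== VERDICT (by name: the statement is the Claim_ definition above) =====
theorem check_spec : Claim_equal_check := by
  intro moves _
  unfold Spec_check check check_alt
  simp only [checkGo_eq_mem, revGo_eq_mem]
  have := mem_positions_iff moves.toList (0, 0) (1, 1)
  have harr : sumD moves.toList + (0, 0) - (1, 1)
      = (((moves.toList.map deltaX).sum - 1 : Int), ((moves.toList.map deltaY).sum - 1 : Int)) := by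
    have : sumD moves.toList = ((moves.toList.map deltaX).sum, (moves.toList.map deltaY).sum) := by
      induction moves.toList with
      | nil => simp [sumD]; rfl
      | cons m rest ih => simp [sumD_cons, ih, delta, Prod.mk_add_mk]
    rw [this]
    simp
  rw [harr] at this
  simp [this]
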